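-- pv_equiv track=rewrite | github.com/yygs321/CodingTest | 백준/Gold/20210. 파일 탐색기/파일 탐색기.py | natural_sort
-- ===== SOURCE A (Python) =====
-- def parse(s):
--     res, i = [], 0
--     while i < len(s):
--         if s[i].isalpha():
--             res.append(s[i])
--             i += 1
--         else:
--             num = ''
--             while i < len(s) and s[i].isdigit():
--                 num += s[i]
--                 i += 1
--             res.append(num)
--     return res
--
-- def natural_sort(s1, s2):
--     p1, p2 = parse(s1), parse(s2)
--     for a, b in zip(p1, p2):
--         if a == b:
--             continue
--         if a.isdigit() and b.isalpha():
--             return -1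
--         if a.isalpha() and b.isdigit():
--             return 1
--         if a.isalpha() and b.isalpha():
--             return (a.lower() > b.lower()) - (a.lower() < b.lower()) or (a > b) - (a < b)
--         if a.isdigit() and b.isdigit():
--             return (int(a) > int(b)) - (int(a) < int(b)) or (len(a) > len(b)) - (len(a) < len(b))
--     return len(p1) - len(p2)
-- ===== SOURCE B (Python) =====
-- def natural_sort(s1, s2):
--     # Fused two-pointer comparison: tokens are extracted on demand from both
--     # strings instead of building two token lists first.
--     def next_token(s, i):
--         c = s[i]
--         if c.isalpha():
--             return c, i + 1
--         j = i
--         while j < len(s) and s[j].isdigit():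
--             j += 1
--         return s[i:j], j
--
--     def count_from(s, i):
--         n = 0
--         while i < len(s):
--             _, i = next_token(s, i)
--             n += 1
--         return n
--
--     i = j = 0
--     while i < len(s1) and j < len(s2):
--         a, i = next_token(s1, i)
--         b, j = next_token(s2, j)
--         if a == b:
--             continue
--         if a.isalpha():
--             if not b.isalpha():
--                 return 1
--             la, lb = a.lower(), b.lower()
--             if la != lb:
--                 return -1 if la < lb else 1
--             return -1 if a < b else 1
--         if b.isalpha():
--             return -1
--         va, vb = int(a), int(b)
--         if va != vb:
--             return -1 if va < vb else 1
--         return -1 if len(a) < len(b) else 1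
--     return count_from(s1, i) - count_from(s2, j)
-- ===== Notes on version B (the rewrite author's own statement) =====
-- stated objective: faster
-- what changed: Replaces parse-both-strings-then-zip with a single fused two-pointer pass that extracts one token from each string on demand, returns the decision as soon as tokens differ, and on exhaustion returns the difference of the remaining token counts (equal to A's total token-count difference since equal tokens are consumed pairwise).
import Mathlib
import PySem

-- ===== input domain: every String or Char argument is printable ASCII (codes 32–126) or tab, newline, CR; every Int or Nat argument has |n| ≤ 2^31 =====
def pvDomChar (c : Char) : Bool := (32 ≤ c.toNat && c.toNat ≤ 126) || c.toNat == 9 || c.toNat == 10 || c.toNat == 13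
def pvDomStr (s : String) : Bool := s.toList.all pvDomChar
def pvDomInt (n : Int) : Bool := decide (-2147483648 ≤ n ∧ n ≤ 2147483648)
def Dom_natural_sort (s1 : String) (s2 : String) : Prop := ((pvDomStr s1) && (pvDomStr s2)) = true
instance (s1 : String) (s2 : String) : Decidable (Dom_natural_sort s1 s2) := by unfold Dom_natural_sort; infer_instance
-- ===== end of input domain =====

-- B is an alternative decomposition: a fused two-pointer pass extracting tokens on demand,
-- instead of A's parse-both-token-lists-then-zip; return values are proved equal on Pre_.

-- exact port of Python's int(t) for the NONEMPTY ALL-DIGIT tokens both programs feed it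
-- (both Pythons call int only on maximal digit runs, where int(t) is the decimal value)
def pvIntOfDigits (ds : List Char) : Int :=
  ds.foldl (fun n c => 10 * n + ((c.toNat : Int) - 48)) 0

-- ===== PORT A =====
-- parse(s): fuel models the while loop; one pass consumes ≥ 1 character on every input
-- admitted by Pre_, so fuel = len + 1 is exact there (on a non-alphanumeric character
-- Python's loop makes no progress and DIVERGES; those inputs are excluded by Pre_).
def pvParseA : Nat → List Char → List String → List String
  | 0, _, acc => acc.reverse
  | _ + 1, [], acc => acc.reverse
  | f + 1, c :: rest, acc =>
    if PySem.Chars.isalpha c then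
      pvParseA f rest (String.ofList [c] :: acc)
    else
      let num := (c :: rest).takeWhile PySem.Chars.isdigit
      pvParseA f ((c :: rest).drop num.length) (String.ofList num :: acc)

-- the 'for a, b in zip(p1, p2)' loop: some r = an early return, none = loop fell through
def pvLoopA : List String → List String → Option Int
  | a :: p1, b :: p2 =>
    if a == b then pvLoopA p1 p2
    else if PySem.Str.strIsdigit a && PySem.Str.strIsalpha b then some (-1)
    else if PySem.Str.strIsalpha a && PySem.Str.strIsdigit b then some 1
    else if PySem.Str.strIsalpha a && PySem.Str.strIsalpha b then
      let c1 : Int := (if PySem.Str.lower b < PySem.Str.lower a then 1 else 0)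
                    - (if PySem.Str.lower a < PySem.Str.lower b then 1 else 0)
      some (if c1 = 0 then (if b < a then (1 : Int) else 0) - (if a < b then 1 else 0) else c1)
    else if PySem.Str.strIsdigit a && PySem.Str.strIsdigit b then
      let va := pvIntOfDigits a.toList
      let vb := pvIntOfDigits b.toList
      let c1 : Int := (if vb < va then 1 else 0) - (if va < vb then 1 else 0)
      some (if c1 = 0 then (if b.length < a.length then (1 : Int) else 0)
                           - (if a.length < b.length then 1 else 0) else c1)
    else pvLoopA p1 p2
  | _, _ => none

def natural_sort (s1 : String) (s2 : String) : Int :=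
  let p1 := pvParseA (s1.toList.length + 1) s1.toList []
  let p2 := pvParseA (s2.toList.length + 1) s2.toList []
  match pvLoopA p1 p2 with
  | some r => r
  | none => (p1.length : Int) - (p2.length : Int)

-- ===== PORT B =====
-- next_token(s, i): the current token and the rest (suffix lists stand for the index i)
def pvNextTok (cs : List Char) : List Char × List Char :=
  match cs with
  | [] => ([], [])
  | c :: rest =>
    if PySem.Chars.isalpha c then ([c], rest)
    else
      let t := (c :: rest).takeWhile PySem.Chars.isdigit
      (t, (c :: rest).drop t.length)

-- count_from(s, i): fuel models the while loop, exact under Pre_ (see pvParseA)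
def pvCountFrom : Nat → List Char → Int
  | 0, _ => 0
  | f + 1, cs =>
    match cs with
    | [] => 0
    | _ :: _ => 1 + pvCountFrom f (pvNextTok cs).2

-- the fused main loop; fuel models the while loop, exact under Pre_ (see pvParseA)
def pvGoB : Nat → List Char → List Char → Int
  | 0, _, _ => 0
  | f + 1, x, y =>
    match x, y with
    | _ :: _, _ :: _ =>
      let px := pvNextTok x
      let py := pvNextTok y
      let a := px.1
      let b := py.1
      if a == b then pvGoB f px.2 py.2
      else if PySem.Chars.strIsalpha a then
        if PySem.Chars.strIsalpha b then
          let la := PySem.Chars.lower a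
          let lb := PySem.Chars.lower b
          if la ≠ lb then (if la < lb then -1 else 1)
          else (if a < b then -1 else 1)
        else 1
      else if PySem.Chars.strIsalpha b then -1
      else
        let va := pvIntOfDigits a
        let vb := pvIntOfDigits b
        if va ≠ vb then (if va < vb then -1 else 1)
        else (if a.length < b.length then -1 else 1)
    | x, y => pvCountFrom (x.length + 1) x - pvCountFrom (y.length + 1) y

def natural_sort_alt (s1 : String) (s2 : String) : Int :=
  pvGoB (s1.toList.length + s2.toList.length + 1) s1.toList s2.toList

-- ===== PRECONDITION & SPEC =====
-- Pre_ excludes exactly the strings containing a non-alphanumeric character: on those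
-- Python A's parse loop makes no progress and DIVERGES (it returns on every other input).
def Pre_natural_sort (s1 : String) (s2 : String) : Prop :=
  (s1.toList.all PySem.Chars.isalnum && s2.toList.all PySem.Chars.isalnum) = true
instance (s1 : String) (s2 : String) : Decidable (Pre_natural_sort s1 s2) := by
  unfold Pre_natural_sort; infer_instance

def pvWitness_natural_sort : String × String := ("a10", "A9")

def Spec_natural_sort (s1 : String) (s2 : String) (out : Int) : Prop := out = natural_sort_alt s1 s2
instance (s1 : String) (s2 : String) (out : Int) : Decidable (Spec_natural_sort s1 s2 out) := by
  unfold Spec_natural_sort; infer_instance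

-- ===== CLAIM (what is proved, stated in full; the proofs are below) =====
def Claim_equal_natural_sort : Prop := ∀ (s1 : String) (s2 : String), Dom_natural_sort s1 s2 → Pre_natural_sort s1 s2 → Spec_natural_sort s1 s2 (natural_sort s1 s2)

-- ===== LEMMAS AND PROOFS =====

-- canonical token list of an all-alphanumeric string (proof-side device)
def pvToks : List Char → List (List Char)
  | [] => []
  | c :: cs =>
    if PySem.Chars.isalpha c then [c] :: pvToks cs
    else if PySem.Chars.isdigit c then
      (c :: cs.takeWhile PySem.Chars.isdigit) :: pvToks (cs.dropWhile PySem.Chars.isdigit)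
    else []
  termination_by cs => cs.length
  decreasing_by
    · simp
    · have := List.length_dropWhile_le (l := cs) (p := PySem.Chars.isdigit)
      simp; omega

-- B's dispatch on a pair of distinct tokens, and the token-level comparison both ports reduce to
def pvDispatch (a b : List Char) : Int :=
  if PySem.Chars.strIsalpha a then
    if PySem.Chars.strIsalpha b then
      let la := PySem.Chars.lower a
      let lb := PySem.Chars.lower b
      if la ≠ lb then (if la < lb then -1 else 1)
      else (if a < b then -1 else 1)
    else 1
  else if PySem.Chars.strIsalpha b then -1
  else
    let va := pvIntOfDigits a
    let vb := pvIntOfDigits b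
    if va ≠ vb then (if va < vb then -1 else 1)
    else (if a.length < b.length then -1 else 1)

def pvCmpT : List (List Char) → List (List Char) → Int
  | a :: ts, b :: us => if a = b then pvCmpT ts us else pvDispatch a b
  | ts, us => (ts.length : Int) - (us.length : Int)

-- a token is either one alphabetic character or a nonempty digit run
def pvValid (t : List Char) : Prop :=
  (∃ c, t = [c] ∧ PySem.Chars.isalpha c = true) ∨ (t ≠ [] ∧ t.all PySem.Chars.isdigit = true)

theorem pv_drop_takeWhile (rest : List Char) (p : Char → Bool) :
    rest.drop (rest.takeWhile p).length = rest.dropWhile p := by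
  induction rest with
  | nil => simp
  | cons c cs ih =>
    by_cases hc : p c = true
    · simpa [hc] using ih
    · simp [hc]

theorem pv_alpha_not_digit (c : Char) (h : PySem.Chars.isalpha c = true) :
    PySem.Chars.isdigit c = false := by
  simp only [PySem.Chars.isalpha, PySem.Chars.isupper, PySem.Chars.islower,
    Bool.or_eq_true, Bool.and_eq_true, decide_eq_true_eq] at h
  simp only [PySem.Chars.isdigit, Bool.and_eq_false_iff, decide_eq_false_iff_not, not_le]
  rcases h with ⟨h1, h2⟩ | ⟨h1, h2⟩
  · exact Or.inr (lt_of_lt_of_le (by decide) h1)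
  · exact Or.inr (lt_of_lt_of_le (by decide) h1)

theorem pv_alnum_iff (c : Char) :
    PySem.Chars.isalnum c = true ↔ (PySem.Chars.isalpha c = true ∨ PySem.Chars.isdigit c = true) := by
  simp [PySem.Chars.isalnum]

-- parse(s) computes the canonical token list on all-alphanumeric input
theorem pv_parseA_eq (fuel : Nat) : ∀ (cs : List Char) (acc : List String),
    cs.length < fuel → cs.all PySem.Chars.isalnum = true →
    pvParseA fuel cs acc = acc.reverse ++ (pvToks cs).map String.ofList := by
  induction fuel with
  | zero => intro cs acc h; omega
  | succ f ih =>
    intro cs acc hlen hall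
    match cs with
    | [] => simp [pvParseA, pvToks]
    | c :: rest =>
      simp only [List.all_cons, Bool.and_eq_true] at hall
      by_cases hc : PySem.Chars.isalpha c = true
      · rw [pvParseA, if_pos hc, pvToks, if_pos hc,
          ih rest _ (by simp at hlen ⊢; omega) hall.2]
        simp
      · have hd : PySem.Chars.isdigit c = true := by
          rcases (pv_alnum_iff c).mp hall.1 with h | h
          · exact absurd h hc
          · exact h
        rw [pvParseA, if_neg hc, pvToks, if_neg hc, if_pos hd]
        simp only [List.takeWhile_cons, hd, if_pos, List.length_cons, List.drop_succ_cons,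
          pv_drop_takeWhile]
        rw [ih (rest.dropWhile PySem.Chars.isdigit) _
          (by have := List.length_dropWhile_le (l := rest) (p := PySem.Chars.isdigit)
              simp at hlen; omega)
          (by
            have hsub : (rest.dropWhile PySem.Chars.isdigit).Sublist rest :=
              List.dropWhile_sublist _
            rw [List.all_eq_true] at hall ⊢
            intro x hx
            exact hall.2 x (hsub.mem hx))]
        simp

-- pvNextTok peels exactly the head token of pvToks
theorem pv_nextTok_toks (c : Char) (rest : List Char)
    (h : (c :: rest).all PySem.Chars.isalnum = true) :
    pvToks (c :: rest) = (pvNextTok (c :: rest)).1 :: pvToks ((pvNextTok (c :: rest)).2) ∧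
    ((pvNextTok (c :: rest)).2).length < (c :: rest).length ∧
    ((pvNextTok (c :: rest)).2).all PySem.Chars.isalnum = true ∧
    (pvNextTok (c :: rest)).1 ≠ [] := by
  simp only [List.all_cons, Bool.and_eq_true] at h
  by_cases hc : PySem.Chars.isalpha c = true
  · refine ⟨?_, ?_, ?_, ?_⟩ <;>
      simp [pvNextTok, pvToks, hc, h.2]
  · have hd : PySem.Chars.isdigit c = true := by
      rcases (pv_alnum_iff c).mp h.1 with h' | h'
      · exact absurd h' hc
      · exact h'
    have hsub : (rest.dropWhile PySem.Chars.isdigit).Sublist rest :=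
      List.dropWhile_sublist _
    have hlen := List.length_dropWhile_le (l := rest) (p := PySem.Chars.isdigit)
    refine ⟨?_, ?_, ?_, ?_⟩
    · simp [pvNextTok, pvToks, hc, hd, pv_drop_takeWhile]
    · simp [pvNextTok, hc, hd, pv_drop_takeWhile]
      omega
    · simp only [pvNextTok, if_neg hc, List.takeWhile_cons, hd, if_pos, List.length_cons,
        List.drop_succ_cons, pv_drop_takeWhile]
      rw [List.all_eq_true] at h ⊢
      intro x hx
      exact h.2 x (hsub.mem hx)
    · simp [pvNextTok, hc, hd]

theorem pv_countFrom_eq (fuel : Nat) : ∀ (cs : List Char),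
    cs.length < fuel → cs.all PySem.Chars.isalnum = true →
    pvCountFrom fuel cs = ((pvToks cs).length : Int) := by
  induction fuel with
  | zero => intro cs h; omega
  | succ f ih =>
    intro cs hlen hall
    match cs with
    | [] => simp [pvCountFrom, pvToks]
    | c :: rest =>
      obtain ⟨ht, hl, ha, -⟩ := pv_nextTok_toks c rest hall
      rw [pvCountFrom, ht]
      rw [ih _ (by simp only [List.length_cons] at hl hlen; omega) ha]
      simp
      ring

theorem pv_goB_eq (fuel : Nat) : ∀ (x y : List Char),
    x.length + y.length < fuel →
    x.all PySem.Chars.isalnum = true → y.all PySem.Chars.isalnum = true →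
    pvGoB fuel x y = pvCmpT (pvToks x) (pvToks y) := by
  induction fuel with
  | zero => intro x y h; omega
  | succ f ih =>
    intro x y hlen hx hy
    match x, y with
    | [], y =>
      simp only [pvGoB]
      rw [pv_countFrom_eq _ _ (by simp) (by simp),
        pv_countFrom_eq _ _ (by omega) hy]
      match hty : pvToks y with
      | [] => simp [pvToks, pvCmpT]
      | t :: ts => simp [pvToks, pvCmpT]
    | c :: xs, [] =>
      simp only [pvGoB]
      rw [pv_countFrom_eq _ _ (by omega) hx,
        pv_countFrom_eq _ _ (by simp) (by simp)]
      match htx : pvToks (c :: xs) with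
      | [] => simp [pvToks, pvCmpT]
      | t :: ts => simp [pvToks, pvCmpT]
    | c :: xs, d :: ys =>
      obtain ⟨htx, hlx, hax, -⟩ := pv_nextTok_toks c xs hx
      obtain ⟨hty, hly, hay, -⟩ := pv_nextTok_toks d ys hy
      simp only [pvGoB]
      rw [htx, hty]
      by_cases heq : (pvNextTok (c :: xs)).1 = (pvNextTok (d :: ys)).1
      · rw [pvCmpT, if_pos heq, if_pos (beq_iff_eq.mpr heq)]
        exact ih (pvNextTok (c :: xs)).2 (pvNextTok (d :: ys)).2
          (by simp only [List.length_cons] at hlx hly hlen ⊢; omega) hax hay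
      · rw [pvCmpT, if_neg heq, if_neg (by simpa using heq)]
        rfl

theorem pv_toks_valid : ∀ (cs : List Char), cs.all PySem.Chars.isalnum = true →
    ∀ t ∈ pvToks cs, pvValid t := by
  intro cs
  induction cs using pvToks.induct with
  | case1 => simp [pvToks]
  | case2 c cs hc ih =>
    intro hall t ht
    simp only [List.all_cons, Bool.and_eq_true] at hall
    rw [pvToks, if_pos hc] at ht
    rcases List.mem_cons.mp ht with rfl | ht
    · exact Or.inl ⟨c, rfl, hc⟩
    · exact ih hall.2 t ht
  | case3 c cs hc hd ih =>
    intro hall t ht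
    simp only [List.all_cons, Bool.and_eq_true] at hall
    rw [pvToks, if_neg hc, if_pos hd] at ht
    rcases List.mem_cons.mp ht with rfl | ht
    · refine Or.inr ⟨by simp, ?_⟩
      simp only [List.all_cons, Bool.and_eq_true]
      exact ⟨hd, List.all_takeWhile⟩
    · refine ih ?_ t ht
      have hsub : (cs.dropWhile PySem.Chars.isdigit).Sublist cs :=
        List.dropWhile_sublist _
      rw [List.all_eq_true] at hall ⊢
      intro x hx
      exact hall.2 x (hsub.mem hx)
  | case4 c cs hc hd =>
    intro hall t ht
    simp only [List.all_cons, Bool.and_eq_true] at hall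
    rcases (pv_alnum_iff c).mp hall.1 with h | h
    · exact absurd h hc
    · exact absurd h hd

-- value of a digit run: bounds and injectivity at fixed length
-- decomposing the decimal value of a digit run at its head
theorem pv_foldVal : ∀ (l : List Char) (n : Int),
    l.foldl (fun n c => 10 * n + ((c.toNat : Int) - 48)) n
      = n * 10 ^ l.length + pvIntOfDigits l := by
  intro l
  induction l with
  | nil => intro n; simp [pvIntOfDigits]
  | cons e es ihe =>
    intro n
    have h2 : pvIntOfDigits (e :: es)
        = es.foldl (fun n c => 10 * n + ((c.toNat : Int) - 48))
            (10 * 0 + ((e.toNat : Int) - 48)) := by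
      rw [pvIntOfDigits, List.foldl_cons]
    rw [List.foldl_cons, ihe, h2, ihe, List.length_cons]
    ring

theorem pv_intOfDigits_cons (c : Char) (cs : List Char) :
    pvIntOfDigits (c :: cs) = ((c.toNat : Int) - 48) * 10 ^ cs.length + pvIntOfDigits cs := by
  rw [pvIntOfDigits, List.foldl_cons, pv_foldVal]
  ring

theorem pv_intOfDigits_bounds : ∀ (ds : List Char), ds.all PySem.Chars.isdigit = true →
    0 ≤ pvIntOfDigits ds ∧ pvIntOfDigits ds < 10 ^ ds.length := by
  intro ds
  induction ds with
  | nil => simp [pvIntOfDigits]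
  | cons c cs ih =>
    intro hall
    simp only [List.all_cons, Bool.and_eq_true] at hall
    have hb := ih hall.2
    have hc : 48 ≤ c.toNat ∧ c.toNat ≤ 57 := by
      have := hall.1
      simp only [PySem.Chars.isdigit, Bool.and_eq_true, decide_eq_true_eq, Char.le_def] at this
      constructor
      · exact_mod_cast this.1
      · exact_mod_cast this.2
    rw [pv_intOfDigits_cons]
    have hP : (0:Int) < 10 ^ cs.length := by positivity
    simp only [List.length_cons, pow_succ]
    constructor
    · nlinarith [hb.1, hP]
    · nlinarith [hb.2, hb.1, hP]

theorem pv_intOfDigits_inj : ∀ (a b : List Char), a.all PySem.Chars.isdigit = true →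
    b.all PySem.Chars.isdigit = true → a.length = b.length →
    pvIntOfDigits a = pvIntOfDigits b → a = b := by
  intro a
  induction a with
  | nil =>
    intro b _ _ hlen _
    exact (List.length_eq_zero_iff.mp hlen.symm).symm
  | cons c cs ih =>
    intro b ha hb hlen hv
    match b with
    | [] => simp at hlen
    | d :: ds =>
      simp only [List.all_cons, Bool.and_eq_true] at ha hb
      simp only [List.length_cons, Nat.add_right_cancel_iff] at hlen
      have hbc := pv_intOfDigits_bounds cs ha.2
      have hbd := pv_intOfDigits_bounds ds hb.2
      have hP : (0:Int) < 10 ^ ds.length := by positivity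
      rw [pv_intOfDigits_cons, pv_intOfDigits_cons, hlen] at hv
      rw [hlen] at hbc
      have hcd : (c.toNat : Int) = (d.toNat : Int) := by
        rcases lt_trichotomy (c.toNat : Int) (d.toNat : Int) with h | h | h
        · exfalso
          have h1 : ((d.toNat : Int) - (c.toNat : Int)) * 10 ^ ds.length
              = pvIntOfDigits cs - pvIntOfDigits ds := by linarith
          have h2 : (10:Int) ^ ds.length
              ≤ ((d.toNat : Int) - (c.toNat : Int)) * 10 ^ ds.length :=
            le_mul_of_one_le_left (le_of_lt hP) (by omega)
          linarith [hbc.2, hbd.1]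
        · exact h
        · exfalso
          have h1 : ((c.toNat : Int) - (d.toNat : Int)) * 10 ^ ds.length
              = pvIntOfDigits ds - pvIntOfDigits cs := by linarith
          have h2 : (10:Int) ^ ds.length
              ≤ ((c.toNat : Int) - (d.toNat : Int)) * 10 ^ ds.length :=
            le_mul_of_one_le_left (le_of_lt hP) (by omega)
          linarith [hbd.2, hbc.1]
      have hc : c = d := by
        have h' : c.toNat = d.toNat := by exact_mod_cast hcd
        have := congrArg Char.ofNat h'
        rwa [Char.ofNat_toNat, Char.ofNat_toNat] at this
      subst hc
      have heqv : pvIntOfDigits cs = pvIntOfDigits ds := by linarith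
      rw [ih ds ha.2 hb.2 hlen heqv]

-- bridges between A's String-level tests and B's List Char level
theorem pv_digit_not_alpha (c : Char) (h : PySem.Chars.isdigit c = true) :
    PySem.Chars.isalpha c = false := by
  cases h' : PySem.Chars.isalpha c
  · rfl
  · rw [pv_alpha_not_digit c h'] at h
    exact absurd h (by simp)

theorem pv_list_trichotomy (a b : List Char) (h : a ≠ b) : a < b ∨ b < a := by
  rcases lt_trichotomy a b with h' | h' | h'
  · exact Or.inl h'
  · exact absurd h' h
  · exact Or.inr h'

theorem pv_valid_alpha_facts (c : Char) (hc : PySem.Chars.isalpha c = true) :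
    PySem.Chars.strIsalpha [c] = true ∧ PySem.Chars.strIsdigit [c] = false := by
  constructor
  · simp [PySem.Chars.strIsalpha, hc]
  · simp [PySem.Chars.strIsdigit, pv_alpha_not_digit c hc]

theorem pv_valid_digit_facts (t : List Char) (hne : t ≠ [])
    (hall : t.all PySem.Chars.isdigit = true) :
    PySem.Chars.strIsdigit t = true ∧ PySem.Chars.strIsalpha t = false := by
  match t with
  | [] => exact absurd rfl hne
  | e :: es =>
    simp only [List.all_cons, Bool.and_eq_true] at hall
    constructor
    · simp [PySem.Chars.strIsdigit, hall.1, hall.2]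
    · simp [PySem.Chars.strIsalpha, pv_digit_not_alpha e hall.1]

-- A's dispatch on one pair of distinct valid tokens agrees with B's
theorem pv_loopA_head (a b : List Char) (ts us : List String)
    (hvA : pvValid a) (hvB : pvValid b) (hne : a ≠ b) :
    pvLoopA (String.ofList a :: ts) (String.ofList b :: us) = some (pvDispatch a b) := by
  have hbeq : (String.ofList a == String.ofList b) = false := by
    simp [String.ext_iff, hne]
  rw [pvLoopA, hbeq]
  simp only [Bool.false_eq_true, if_false]
  rcases hvA with ⟨c, rfl, hc⟩ | ⟨hna, hda⟩
  · obtain ⟨hA1, hA2⟩ := pv_valid_alpha_facts c hc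
    rcases hvB with ⟨d, rfl, hd⟩ | ⟨hnb, hdb⟩
    · -- alpha vs alpha
      obtain ⟨hB1, hB2⟩ := pv_valid_alpha_facts d hd
      simp only [PySem.Str.strIsdigit_eq, PySem.Str.strIsalpha_eq, String.toList_ofList,
        hA1, hA2, hB1, hB2, Bool.false_and, Bool.true_and, Bool.false_eq_true, if_false,
        if_true]
      have hdisp : pvDispatch [c] [d]
          = (if PySem.Chars.lower [c] ≠ PySem.Chars.lower [d] then
               (if PySem.Chars.lower [c] < PySem.Chars.lower [d] then (-1 : Int) else 1)
             else (if [c] < [d] then (-1 : Int) else 1)) := by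
        rw [pvDispatch, if_pos hA1, if_pos hB1]
      rw [hdisp]
      rcases lt_trichotomy (PySem.Chars.lower [c]) (PySem.Chars.lower [d]) with h | h | h
      · have h1 : ¬ PySem.Chars.lower [d] < PySem.Chars.lower [c] := asymm h
        simp [h, h1, ne_of_lt h]
      · rcases pv_list_trichotomy [c] [d] hne with h' | h'
        · have h1 : ¬ [d] < [c] := asymm h'
          simp [h, h', h1]
        · have h1 : ¬ [c] < [d] := asymm h'
          simp [h, h', h1]
      · have h1 : ¬ PySem.Chars.lower [c] < PySem.Chars.lower [d] := asymm h
        simp [h, h1, ne_of_gt h]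
    · -- alpha vs digit
      obtain ⟨hB1, hB2⟩ := pv_valid_digit_facts b hnb hdb
      simp only [PySem.Str.strIsdigit_eq, PySem.Str.strIsalpha_eq, String.toList_ofList,
        hA1, hA2, hB1, hB2, Bool.and_false, Bool.and_true,
        Bool.false_eq_true, if_false, if_true]
      rw [pvDispatch, if_pos hA1, if_neg (by simp [hB2])]
  · obtain ⟨hA1, hA2⟩ := pv_valid_digit_facts a hna hda
    rcases hvB with ⟨d, rfl, hd⟩ | ⟨hnb, hdb⟩
    · -- digit vs alpha
      obtain ⟨hB1, hB2⟩ := pv_valid_alpha_facts d hd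
      simp only [PySem.Str.strIsdigit_eq, PySem.Str.strIsalpha_eq, String.toList_ofList,
        hA1, hA2, hB1, hB2, Bool.true_and, Bool.and_false, Bool.false_eq_true, if_false,
        if_true]
      rw [pvDispatch, if_neg (by simp [hA2]), if_pos hB1]
    · -- digit vs digit
      obtain ⟨hB1, hB2⟩ := pv_valid_digit_facts b hnb hdb
      simp only [PySem.Str.strIsdigit_eq, PySem.Str.strIsalpha_eq, String.toList_ofList,
        hA1, hA2, hB1, hB2, Bool.and_false, Bool.and_true,
        Bool.false_eq_true, if_false, if_true]
      have hdisp : pvDispatch a b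
          = (if pvIntOfDigits a ≠ pvIntOfDigits b then
               (if pvIntOfDigits a < pvIntOfDigits b then (-1 : Int) else 1)
             else (if a.length < b.length then (-1 : Int) else 1)) := by
        rw [pvDispatch, if_neg (by simp [hA2]), if_neg (by simp [hB2])]
      rw [hdisp]
      rcases lt_trichotomy (pvIntOfDigits a) (pvIntOfDigits b) with h | h | h
      · have h1 : ¬ pvIntOfDigits b < pvIntOfDigits a := asymm h
        simp [h, h1, ne_of_lt h]
      · have hlenne : a.length ≠ b.length := by
          intro hl
          exact hne (pv_intOfDigits_inj a b hda hdb hl h)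
        rcases Nat.lt_or_ge a.length b.length with h' | h'
        · have h2 : ¬ b.length < a.length := by omega
          simp [h, h', h2]
        · have h'' : b.length < a.length := by omega
          have h3 : ¬ a.length < b.length := by omega
          simp [h, h'', h3]
      · have h1 : ¬ pvIntOfDigits a < pvIntOfDigits b := asymm h
        simp [h, h1, ne_of_gt h]

-- A's zip loop + fallback agrees with the token-level comparison on valid tokens
theorem pv_loopA_eq : ∀ (ts us : List (List Char)),
    (∀ t ∈ ts, pvValid t) → (∀ t ∈ us, pvValid t) →
    (match pvLoopA (ts.map String.ofList) (us.map String.ofList) with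
     | some r => r
     | none => (ts.length : Int) - (us.length : Int)) = pvCmpT ts us := by
  intro ts
  induction ts with
  | nil =>
    intro us _ _
    match us with
    | [] => simp [pvLoopA, pvCmpT]
    | u :: us => simp [pvLoopA, pvCmpT]
  | cons a ts ih =>
    intro us hts hus
    match us with
    | [] => simp [pvLoopA, pvCmpT]
    | b :: us' =>
      have hvA : pvValid a := hts a (by simp)
      have hvB : pvValid b := hus b (by simp)
      by_cases heq : a = b
      · subst heq
        have hrec := ih us' (fun t ht => hts t (by simp [ht])) (fun t ht => hus t (by simp [ht]))
        rw [pvCmpT, if_pos rfl]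
        simp only [List.map_cons]
        rw [pvLoopA, if_pos (by simp)]
        rcases hres : pvLoopA (ts.map String.ofList) (us'.map String.ofList) with _ | r
        · rw [hres] at hrec
          have hrec' : (ts.length : Int) - (us'.length : Int) = pvCmpT ts us' := hrec
          show (((a :: ts).length : Int) - ((a :: us').length : Int)) = pvCmpT ts us'
          simp only [List.length_cons]
          omega
        · rw [hres] at hrec
          show r = pvCmpT ts us'
          exact hrec
      · rw [pvCmpT, if_neg heq]
        simp only [List.map_cons]
        rw [pv_loopA_head a b _ _ hvA hvB heq]


-- ===== VERDICT (by name: the statement is the Claim_ definition above) =====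
theorem natural_sort_spec : Claim_equal_natural_sort := by
  intro s1 s2 _hdom hpre
  unfold Spec_natural_sort
  unfold Pre_natural_sort at hpre
  simp only [Bool.and_eq_true] at hpre
  obtain ⟨h1, h2⟩ := hpre
  unfold natural_sort natural_sort_alt
  rw [pv_parseA_eq _ _ _ (by omega) h1, pv_parseA_eq _ _ _ (by omega) h2]
  simp only [List.reverse_nil, List.nil_append]
  rw [pv_goB_eq _ _ _ (by omega) h1 h2]
  have hmain := pv_loopA_eq (pvToks s1.toList) (pvToks s2.toList)
      (pv_toks_valid _ h1) (pv_toks_valid _ h2)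
  simpa using hmain
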